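-- pv_equiv track=rewrite | github.com/lozokuba667/Genetic-Alghoritm | generator.py | validateSeq
-- ===== SOURCE A (Python) =====
-- def validateSeq(seq, width):
--     new_seq = seq
--     windows = [new_seq[x : width + x] for x in range((len(new_seq) - width) + 1)]
--     occurences = {}
--     for singleWindow in windows:
--         if singleWindow not in occurences:
--             occurences[singleWindow] = 0
--         occurences[singleWindow] += 1
--
--     repeated_windows = []
--
--     for window_occurence in occurences.keys():
--         if occurences[window_occurence] > 1:
--             repeated_windows.append(window_occurence)
--
--     if len(repeated_windows) == 0:
--         return False
--     else:
--         return True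
-- ===== SOURCE B (Python) =====
-- def validateSeq(seq, width):
--     seen = set()
--     for i in range(len(seq) - width + 1):
--         w = seq[i:i+width]
--         if w in seen:
--             return True
--         seen.add(w)
--     return False
-- ===== Notes on version B (the rewrite author's own statement) =====
-- stated objective: simpler
-- what changed: One early-exiting pass keeping a set of windows seen so far replaces A's three phases (materialise all windows, count them into a dict, collect repeated keys, test emptiness).
import Mathlib
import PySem

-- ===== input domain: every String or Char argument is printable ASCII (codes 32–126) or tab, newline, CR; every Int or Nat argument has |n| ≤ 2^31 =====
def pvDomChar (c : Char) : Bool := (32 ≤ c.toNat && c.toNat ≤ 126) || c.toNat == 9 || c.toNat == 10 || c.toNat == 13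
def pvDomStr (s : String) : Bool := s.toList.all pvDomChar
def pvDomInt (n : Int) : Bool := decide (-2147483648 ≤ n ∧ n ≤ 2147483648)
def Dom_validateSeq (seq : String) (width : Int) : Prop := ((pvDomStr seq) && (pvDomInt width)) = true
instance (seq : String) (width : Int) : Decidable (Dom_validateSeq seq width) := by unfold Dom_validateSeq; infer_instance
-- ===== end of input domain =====

-- B replaces A's three phases (build all windows, count into a dict, collect repeated
-- keys, test emptiness) by one early-exiting pass over a set of windows seen so far (simpler).

-- ===== PORT A =====
def validateSeq (seq : String) (width : Int) : Bool :=
  let new_seq := seq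
  let windows := (PySem.List.pyRange 0 ((PySem.Str.len new_seq - width) + 1) 1).map
      (fun x => PySem.Str.slice new_seq (some x) (some (width + x)))
  let occurences := windows.foldl
      (fun d singleWindow =>
        -- 'if singleWindow not in occurences: occurences[singleWindow] = 0' then
        -- 'occurences[singleWindow] += 1' (the key is now present, so d[k] += 1 is modify; exact)
        (if d.contains singleWindow then d else d.insert singleWindow (0 : Int)).modify
          singleWindow 0 (· + 1))
      PySem.Dict.empty
  let repeated_windows := occurences.keys.foldl
      -- 'occurences[k]' with k drawn from occurences.keys: the key is present, so getD k 0 is exact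
      (fun acc k => if occurences.getD k 0 > 1 then acc ++ [k] else acc) []
  if repeated_windows.length = 0 then false else true

-- ===== PORT B =====
def pvAltLoop (seq : String) (width : Int) : List Int → PySem.Set String → Bool
  | [], _ => false
  | i :: rest, seen =>
      let w := PySem.Str.slice seq (some i) (some (i + width))
      if PySem.Set.contains seen w then true
      else pvAltLoop seq width rest (PySem.Set.add seen w)

def validateSeq_alt (seq : String) (width : Int) : Bool :=
  pvAltLoop seq width (PySem.List.pyRange 0 ((PySem.Str.len seq - width) + 1) 1) PySem.Set.empty

-- ===== PRECONDITION & SPEC =====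
def Spec_validateSeq (seq : String) (width : Int) (out : Bool) : Prop := out = validateSeq_alt seq width
instance (seq : String) (width : Int) (out : Bool) : Decidable (Spec_validateSeq seq width out) := by unfold Spec_validateSeq; infer_instance

-- ===== CLAIM (what is proved, stated in full; the proofs are below) =====
def Claim_equal_validateSeq : Prop := ∀ (seq : String) (width : Int), Dom_validateSeq seq width → Spec_validateSeq seq width (validateSeq seq width)

-- ===== LEMMAS AND PROOFS =====

-- A's "insert 0 if absent, then += 1" step is exactly the Counter step.
theorem pvCounterStep (d : PySem.Dict String Int) (w : String) :
    (if d.contains w then d else d.insert w (0 : Int)).modify w 0 (· + 1)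
      = d.modify w 0 (· + 1) := by
  by_cases h : d.contains w = true
  · simp [h]
  · have h' : d.contains w = false := by simpa using h
    simp [PySem.Dict.modify, h', PySem.Dict.getD_insert_self,
      PySem.Dict.insert_insert_self, PySem.Dict.getD_of_not_contains _ _ h']

-- A's count-filter-test phases decide "some window repeats".
theorem pvA_core (ws : List String) :
    (let occ := ws.foldl
        (fun d w => (if d.contains w then d else d.insert w (0 : Int)).modify w 0 (· + 1))
        PySem.Dict.empty
     let rep := occ.keys.foldl (fun acc k => if occ.getD k 0 > 1 then acc ++ [k] else acc) ([] : List String)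
     if rep.length = 0 then false else true) = decide (¬ ws.Nodup) := by
  have hocc : ws.foldl
      (fun d w => (if d.contains w then d else d.insert w (0 : Int)).modify w 0 (· + 1))
      PySem.Dict.empty = PySem.Dict.counter ws := by
    rw [PySem.Dict.counter_eq_foldl]
    exact PySem.List.foldl_congr_mem _ _ _ _ (fun acc x _ => pvCounterStep acc x)
  simp only [hocc, PySem.List.foldl_append_ite_eq_filter, List.nil_append,
    PySem.Dict.keys_counter, PySem.Dict.getD_counter]
  by_cases hnd : ws.Nodup
  · have hfil : (PySem.Set.ofList ws).filter (fun k => decide (ws.count k > 1)) = [] := by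
      rw [List.filter_eq_nil_iff]
      intro k _
      have := List.nodup_iff_count_le_one.mp hnd k
      simp; omega
    simp [hfil, hnd]
  · obtain ⟨a, ha⟩ : ∃ a, 1 < ws.count a := by
      by_contra hc
      exact hnd (List.nodup_iff_count_le_one.mpr
        (fun a => by by_contra hgt; exact hc ⟨a, by omega⟩))
    have hmem : a ∈ ws := by
      have : 0 < ws.count a := by omega
      exact List.count_pos_iff.mp this
    have hfil : a ∈ (PySem.Set.ofList ws).filter (fun k => decide (ws.count k > 1)) := by
      rw [List.mem_filter]
      exact ⟨(PySem.Set.mem_ofList _ _).mpr hmem, by simpa using ha⟩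
    have : ((PySem.Set.ofList ws).filter (fun k => decide (ws.count k > 1))).length ≠ 0 := by
      intro h0
      rw [List.length_eq_zero_iff] at h0
      simp [h0] at hfil
    simp [this, hnd]

-- B's early-exiting pass decides "already seen, or some window repeats".
theorem pvAltLoop_true_iff (seq : String) (width : Int) (is : List Int) (seen : PySem.Set String) :
    pvAltLoop seq width is seen = true
      ↔ (∃ i ∈ is, PySem.Str.slice seq (some i) (some (i + width)) ∈ seen)
        ∨ ¬ (is.map (fun i => PySem.Str.slice seq (some i) (some (i + width)))).Nodup := by
  induction is generalizing seen with
  | nil => simp [pvAltLoop]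
  | cons i rest ih =>
      by_cases h : PySem.Str.slice seq (some i) (some (i + width)) ∈ seen
      · simp [pvAltLoop]
        tauto
      · have hc : PySem.Set.contains seen (PySem.Str.slice seq (some i) (some (i + width))) = false := by
          exact Bool.eq_false_iff.mpr (fun h0 => h ((PySem.Set.contains_iff _ _).mp h0))
        simp only [pvAltLoop, hc, Bool.false_eq_true, if_false, ih,
          PySem.Set.mem_add, List.map_cons, List.nodup_cons, List.mem_cons, List.mem_map]
        constructor
        · rintro (⟨j, hj, hjs | hje⟩ | hnd)
          · exact Or.inl ⟨j, Or.inr hj, hjs⟩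
          · exact Or.inr (fun hand => hand.1 ⟨j, hj, hje⟩)
          · exact Or.inr (fun hand => hnd hand.2)
        · rintro (⟨j, hj | hj, hjs⟩ | hnd)
          · exact absurd (hj ▸ hjs) h
          · exact Or.inl ⟨j, hj, Or.inl hjs⟩
          · by_cases hex : ∃ a ∈ rest, PySem.Str.slice seq (some a) (some (a + width))
                = PySem.Str.slice seq (some i) (some (i + width))
            · obtain ⟨j, hj, hje⟩ := hex
              exact Or.inl ⟨j, hj, Or.inr hje⟩
            · exact Or.inr (fun hnodup => hnd ⟨hex, hnodup⟩)

-- ===== VERDICT (by name: the statement is the Claim_ definition above) =====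
theorem validateSeq_spec : Claim_equal_validateSeq := by
  intro seq width _
  unfold Spec_validateSeq
  have hA := pvA_core ((PySem.List.pyRange 0 ((PySem.Str.len seq - width) + 1) 1).map
      (fun x => PySem.Str.slice seq (some x) (some (width + x))))
  have hmap : (PySem.List.pyRange 0 ((PySem.Str.len seq - width) + 1) 1).map
      (fun i => PySem.Str.slice seq (some i) (some (i + width)))
      = (PySem.List.pyRange 0 ((PySem.Str.len seq - width) + 1) 1).map
      (fun x => PySem.Str.slice seq (some x) (some (width + x))) := by
    exact List.map_congr_left (fun i _ => by rw [Int.add_comm])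
  have hB : validateSeq_alt seq width = true
      ↔ ¬ ((PySem.List.pyRange 0 ((PySem.Str.len seq - width) + 1) 1).map
          (fun x => PySem.Str.slice seq (some x) (some (width + x)))).Nodup := by
    rw [validateSeq_alt, pvAltLoop_true_iff, hmap]
    simp [PySem.Set.empty]
  show validateSeq seq width = validateSeq_alt seq width
  rw [show validateSeq seq width = _ from hA, Bool.eq_iff_iff, decide_eq_true_iff, hB]
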